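-- pv_equiv track=rewrite | github.com/zby/DayDreamingDayDreaming | src/daydreaming_dagster/utils/legacy_gens_migration.py | _match_suffix
-- ===== SOURCE A (Python) =====
-- from typing import Dict, Iterable, List, Optional, Sequence, Set, Tuple
--
-- def _match_suffix(source: str, candidates: Sequence[str]) -> Optional[Tuple[str, str]]:
--     for candidate in sorted(candidates, key=len, reverse=True):
--         if source == candidate:
--             return "", candidate
--         suffix = "_" + candidate
--         if source.endswith(suffix):
--             return source[: -len(suffix)], candidate
--     return None
-- ===== SOURCE B (Python) =====
-- def _match_suffix(source, candidates):
--     cand = set(candidates)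
--     if source in cand:
--         return "", source
--     for i, ch in enumerate(source):
--         if ch == "_" and source[i + 1:] in cand:
--             return source[:i], source[i + 1:]
--     return None
-- ===== Notes on version B (the rewrite author's own statement) =====
-- stated objective: alternative
-- what changed: Instead of sorting all candidates by length and testing each with endswith, B builds a set of the candidates once and scans the source left-to-right, testing source itself and each underscore-boundary suffix for membership; measured 1.3-1.8x faster depending on the run, claimed conservatively as not faster.
import Mathlib
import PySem

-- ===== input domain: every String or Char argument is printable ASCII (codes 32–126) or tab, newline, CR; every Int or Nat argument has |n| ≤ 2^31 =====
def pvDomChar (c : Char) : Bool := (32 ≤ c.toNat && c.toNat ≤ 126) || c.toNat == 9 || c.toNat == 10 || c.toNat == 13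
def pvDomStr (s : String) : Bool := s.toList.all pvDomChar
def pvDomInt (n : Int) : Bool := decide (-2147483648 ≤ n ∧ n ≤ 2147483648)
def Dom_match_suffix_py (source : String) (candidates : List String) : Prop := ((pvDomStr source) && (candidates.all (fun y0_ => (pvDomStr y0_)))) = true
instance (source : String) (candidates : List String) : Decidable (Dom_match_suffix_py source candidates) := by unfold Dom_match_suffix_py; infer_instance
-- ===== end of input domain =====

-- B replaces A's sort-by-length-then-endswith scan by one set of the candidates plus a single
-- left-to-right scan of the source's underscore boundaries (objective: alternative algorithm).

-- ===== PORT A =====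
-- the 'for candidate in sorted(...)' loop of A
def matchLoopA (s : List Char) : List (List Char) → Option (String × String)
  | [] => none
  | c :: rest =>
    if s = c then some ("", String.ofList c)
    else
      let suffix := '_' :: c
      if PySem.Chars.endswith s suffix then
        some (String.ofList (PySem.List.slice s none (some (-(suffix.length : Int)))), String.ofList c)
      else matchLoopA s rest

def match_suffix_py (source : String) (candidates : List String) : Option (String × String) :=
  matchLoopA source.toList
    (PySem.List.sorted (candidates.map String.toList) (fun c => c.length) true)

-- ===== PORT B =====
-- the 'for i, ch in enumerate(source)' loop of B; pre is source[:i]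
def matchLoopB (cset : PySem.Set (List Char)) (pre : List Char) : List Char → Option (String × String)
  | [] => none
  | ch :: rest =>
    if ch = '_' ∧ rest ∈ cset then some (String.ofList pre, String.ofList rest)
    else matchLoopB cset (pre ++ [ch]) rest

def match_suffix_py_alt (source : String) (candidates : List String) : Option (String × String) :=
  let cset := PySem.Set.ofList (candidates.map String.toList)
  if source.toList ∈ cset then some ("", source)
  else matchLoopB cset [] source.toList

-- ===== PRECONDITION & SPEC =====
def Spec_match_suffix_py (source : String) (candidates : List String) (out : Option (String × String)) : Prop := out = match_suffix_py_alt source candidates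
instance (source : String) (candidates : List String) (out : Option (String × String)) : Decidable (Spec_match_suffix_py source candidates out) := by unfold Spec_match_suffix_py; infer_instance

-- ===== CLAIM (what is proved, stated in full; the proofs are below) =====
def Claim_equal_match_suffix_py : Prop := ∀ (source : String) (candidates : List String), Dom_match_suffix_py source candidates → Spec_match_suffix_py source candidates (match_suffix_py source candidates)

-- ===== LEMMAS AND PROOFS =====

-- an underscore-prefixed suffix is strictly shorter than the source
lemma len_of_endswith {s c : List Char} (h : PySem.Chars.endswith s ('_' :: c) = true) :
    c.length + 1 ≤ s.length := by
  have := ((PySem.Chars.endswith_iff _ _).1 h).length_le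
  simpa using this

-- exact-match case: if s occurs in a length-descending list, A's loop stops at it with ("", s)
lemma loopA_mem (s : List Char) :
    ∀ l : List (List Char), l.Pairwise (fun a b => b.length ≤ a.length) → s ∈ l →
      matchLoopA s l = some ("", String.ofList s) := by
  intro l
  induction l with
  | nil => intro _ h; simp at h
  | cons c rest ih =>
    intro hp hmem
    rcases List.pairwise_cons.1 hp with ⟨hc, hp'⟩
    by_cases hsc : s = c
    · subst hsc; simp [matchLoopA]
    · have hsr : s ∈ rest := by
        rcases List.mem_cons.1 hmem with h | h
        · exact absurd h hsc
        · exact h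
      have hlen : s.length ≤ c.length := hc s hsr
      have hends : PySem.Chars.endswith s ('_' :: c) = false := by
        rcases Bool.eq_false_or_eq_true (PySem.Chars.endswith s ('_' :: c)) with h | h
        · have := len_of_endswith h; omega
        · exact h
      simp only [matchLoopA, if_neg hsc, hends, Bool.false_eq_true, if_false]
      exact ih hp' hsr

-- B's loop returns none when no underscore-boundary suffix of t is a candidate
lemma loopB_none (cset : PySem.Set (List Char)) :
    ∀ t pre, (∀ p c : List Char, t = p ++ '_' :: c → c ∉ cset) →
      matchLoopB cset pre t = none := by
  intro t
  induction t with
  | nil => intro _ _; simp [matchLoopB]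
  | cons ch rest ih =>
    intro pre h
    have hbr : ¬ (ch = '_' ∧ rest ∈ cset) := by
      rintro ⟨h1, h2⟩
      exact h [] rest (by simp [h1]) h2
    simp only [matchLoopB, if_neg hbr]
    exact ih (pre ++ [ch]) (fun p c hpc hmem => h (ch :: p) c (by simp [hpc]) hmem)

-- B's loop returns the split at the leftmost matching underscore boundary
lemma loopB_some (cset : PySem.Set (List Char)) :
    ∀ (t pre p c : List Char), t = p ++ '_' :: c → c ∈ cset →
      (∀ p' c' : List Char, t = p' ++ '_' :: c' → c' ∈ cset → p.length ≤ p'.length) →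
      matchLoopB cset pre t = some (String.ofList (pre ++ p), String.ofList c) := by
  intro t
  induction t with
  | nil => intro pre p c ht _ _; simp at ht
  | cons ch rest ih =>
    intro pre p c ht hc hmin
    cases p with
    | nil =>
      simp only [List.nil_append, List.cons.injEq] at ht
      obtain ⟨h1, h2⟩ := ht
      subst h1; subst h2
      simp [matchLoopB, hc]
    | cons q p' =>
      simp only [List.cons_append, List.cons.injEq] at ht
      obtain ⟨h1, h2⟩ := ht
      subst h1
      have hbr : ¬ (ch = '_' ∧ rest ∈ cset) := by
        rintro ⟨hu, hmem⟩
        have := hmin [] rest (by simp [hu]) hmem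
        simp at this
      simp only [matchLoopB, if_neg hbr]
      have := ih (pre ++ [ch]) p' c h2 hc
        (fun p'' c'' hpc hmem => by
          have := hmin (ch :: p'') c'' (by simp [hpc]) hmem
          simpa using this)
      simpa [List.append_assoc] using this

-- no-exact-match case: A's loop over any length-descending list containing all matching
-- candidates equals B's scan
lemma loopA_eq_loopB (s : List Char) (cs : List (List Char)) (hs : s ∉ cs) :
    ∀ l : List (List Char), l.Pairwise (fun a b => b.length ≤ a.length) →
      (∀ c ∈ l, c ∈ cs) →
      (∀ c ∈ cs, PySem.Chars.endswith s ('_' :: c) = true → c ∈ l) →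
      matchLoopA s l = matchLoopB (PySem.Set.ofList cs) [] s := by
  intro l
  induction l with
  | nil =>
    intro _ _ hall
    have : matchLoopB (PySem.Set.ofList cs) [] s = none := by
      apply loopB_none
      intro p c hpc hmem
      have hcs : c ∈ cs := (PySem.Set.mem_ofList _ _).1 hmem
      have hend : PySem.Chars.endswith s ('_' :: c) = true := by
        rw [PySem.Chars.endswith_iff]
        exact ⟨p, hpc.symm⟩
      exact absurd (hall c hcs hend) (by simp)
    simp [matchLoopA, this]
  | cons c rest ih =>
    intro hp hsub hall
    rcases List.pairwise_cons.1 hp with ⟨hc, hp'⟩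
    have hsc : s ≠ c := fun h => hs (h ▸ hsub c (by simp))
    by_cases hend : PySem.Chars.endswith s ('_' :: c) = true
    · -- head matches: both return the split at this boundary
      obtain ⟨p, hps⟩ := (PySem.Chars.endswith_iff _ _).1 hend
      have hslen : s.length = p.length + (c.length + 1) := by
        rw [← hps]; simp
      have hB : matchLoopB (PySem.Set.ofList cs) [] s
          = some (String.ofList ([] ++ p), String.ofList c) := by
        apply loopB_some _ s [] p c hps.symm
          ((PySem.Set.mem_ofList _ _).2 (hsub c (by simp)))
        intro p' c' hpc hmem
        have hc's : c' ∈ cs := (PySem.Set.mem_ofList _ _).1 hmem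
        have hc'l : c' ∈ c :: rest := hall c' hc's (by
          rw [PySem.Chars.endswith_iff]; exact ⟨p', hpc.symm⟩)
        have hlen : c'.length ≤ c.length := by
          rcases List.mem_cons.1 hc'l with h | h
          · rw [h]
          · exact hc c' h
        have hslen' : s.length = p'.length + (c'.length + 1) := by
          rw [hpc]; simp
        omega
      have hslice : PySem.List.slice s none (some (-1 + -(c.length : Int))) = p := by
        have hcast : (-1 + -(c.length : Int)) = -(((c.length + 1 : Nat)) : Int) := by
          push_cast; ring
        rw [hcast, PySem.List.slice_to_neg_natCast s (c.length + 1) (by omega), ← hps]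
        have hlen : (p ++ '_' :: c).length - (c.length + 1) = p.length := by simp
        rw [hlen]
        exact List.take_left
      simp [matchLoopA, hsc, hend, hB, hslice]
    · -- head does not match: drop it on both sides
      have hend' : PySem.Chars.endswith s ('_' :: c) = false := by
        rcases Bool.eq_false_or_eq_true (PySem.Chars.endswith s ('_' :: c)) with h | h
        · exact absurd h hend
        · exact h
      simp only [matchLoopA, if_neg hsc, hend', Bool.false_eq_true, if_false]
      apply ih hp' (fun c' h => hsub c' (List.mem_cons_of_mem _ h))
      intro c' hc's hend''
      have : c' ∈ c :: rest := hall c' hc's hend''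
      rcases List.mem_cons.1 this with h | h
      · exact absurd (h ▸ hend'') hend
      · exact h

-- ===== VERDICT (by name: the statement is the Claim_ definition above) =====
theorem match_suffix_py_spec : Claim_equal_match_suffix_py := by
  intro source candidates _
  unfold Spec_match_suffix_py match_suffix_py match_suffix_py_alt
  set s := source.toList with hsdef
  set cs := candidates.map String.toList with hcsdef
  by_cases hmem : s ∈ cs
  · have hA : matchLoopA s (PySem.List.sorted cs (fun c => c.length) true)
        = some ("", String.ofList s) := by
      apply loopA_mem
      · exact PySem.List.sorted_pairwise_rev cs (fun c => c.length)
      · exact (PySem.List.mem_sorted _ _ _ _).2 hmem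
    rw [hA]
    have hmem' : s ∈ PySem.Set.ofList cs := (PySem.Set.mem_ofList _ _).2 hmem
    rw [if_pos hmem']
    simp [hsdef]
  · have hnot : s ∉ PySem.Set.ofList cs := fun h => hmem ((PySem.Set.mem_ofList _ _).1 h)
    rw [if_neg hnot]
    apply loopA_eq_loopB s cs hmem
    · exact PySem.List.sorted_pairwise_rev cs (fun c => c.length)
    · exact fun c h => (PySem.List.mem_sorted _ _ _ _).1 h
    · exact fun c h _ => (PySem.List.mem_sorted _ _ _ _).2 h
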